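-- pv_equiv track=rewrite | github.com/dushyant18033/KMap-Solver | HW2_2018033.py | listInput
-- ===== SOURCE A (Python) =====
-- def listInput(string,bits):
-- #Decodes the input string to the required format of the program
-- #Returns a list having 2**bits integer elements 0, 1 or 2.
-- #2 represents a don't care condition.
--
-- 	beg=string.find('(') + 1
-- 	end=string.find(')')
--
-- 	if(string[beg:end].find(",")!=-1):
-- 		ones=list(map(int,(string[beg:end].split(","))))
-- 	elif(string[beg:end].isdigit()):
-- 		ones=list()
-- 		ones.append(int(string[beg:end]))
-- 	else:
-- 		ones=list()
-- 	#Getting the minterms.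
--
-- 	b1=string.find('d (')
-- 	dontCares=list()
-- 	if(b1!=-1):
-- 		b1+=3
-- 		e1=string.find(')',b1)
-- 		dontCares=list(map(int,(string[b1:e1]).split(",")))
-- 	#Getting the don't cares
--
-- 	kmap=list()
-- 	for i in range(2**bits):
-- 		if(i in ones):
-- 			kmap.append(1)
-- 		elif(i in dontCares):
-- 			kmap.append(2)
-- 		else:
-- 			kmap.append(0)
--
-- 	return kmap
-- ===== SOURCE B (Python) =====
-- def listInput(string, bits):
--     # Parsing as in the original; the k-map is then built by SCATTER
--     # (preallocate and assign) instead of scanning every cell's membership.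
--     beg = string.find('(') + 1
--     end = string.find(')')
--     inner = string[beg:end]
--     if inner.find(",") != -1:
--         ones = [int(p) for p in inner.split(",")]
--     elif inner.isdigit():
--         ones = [int(inner)]
--     else:
--         ones = []
--
--     b1 = string.find('d (')
--     dontCares = []
--     if b1 != -1:
--         e1 = string.find(')', b1 + 3)
--         dontCares = [int(p) for p in string[b1 + 3:e1].split(",")]
--
--     n = 2 ** bits
--     kmap = [0] * n
--     for d in dontCares:        # don't-cares first, so ones win on overlap
--         if 0 <= d < n:
--             kmap[d] = 2
--     for o in ones:
--         if 0 <= o < n: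
--             kmap[o] = 1
--     return kmap
-- ===== Notes on version B (the rewrite author's own statement) =====
-- stated objective: alternative
-- what changed: The k-map is built by scatter (preallocate [0]*n, assign 2 at each in-range don't-care, then 1 at each in-range minterm) instead of scanning all 2**bits cells with linear membership tests 'i in ones' / 'i in dontCares'; timing on generated inputs could not confirm a speedup at the largest sizes, so no speed is claimed.
import Mathlib
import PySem

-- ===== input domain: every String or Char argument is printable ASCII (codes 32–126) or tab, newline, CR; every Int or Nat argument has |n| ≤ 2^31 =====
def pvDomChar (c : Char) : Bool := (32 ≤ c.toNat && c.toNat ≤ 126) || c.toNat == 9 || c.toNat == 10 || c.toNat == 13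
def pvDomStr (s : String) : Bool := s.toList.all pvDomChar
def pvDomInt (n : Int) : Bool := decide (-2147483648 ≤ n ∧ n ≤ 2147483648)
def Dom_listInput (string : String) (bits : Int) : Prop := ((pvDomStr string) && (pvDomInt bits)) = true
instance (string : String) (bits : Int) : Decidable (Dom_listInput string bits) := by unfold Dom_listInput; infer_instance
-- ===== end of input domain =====

-- B builds the k-map by scatter (preallocate, assign don't-cares then ones) instead of A's
-- membership scan over all cells; return value proved equal on Pre_ (inputs where A's int() parses and 0 ≤ bits < 63).

-- ===== PORT A =====
-- parsing of ones, shared verbatim by both ports (it is identical in both Pythons)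
def pvOnes (string : String) : List Int :=
  let beg := PySem.Str.find string "(" + 1
  let end_ := PySem.Str.find string ")"
  let inner := PySem.Str.slice string (some beg) (some end_)
  if PySem.Str.find inner "," ≠ -1 then
    ((PySem.Str.split? inner ",").getD []).map (fun p => (PySem.Int.ofStr? p).getD 0)
  else if PySem.Str.strIsdigit inner then
    [(PySem.Int.ofStr? inner).getD 0]
  else []

-- parsing of dontCares, shared verbatim by both ports
def pvDontCares (string : String) : List Int :=
  let b1 := PySem.Str.find string "d ("
  if b1 ≠ -1 then
    let b1' := b1 + 3
    let e1 := PySem.Str.findFrom string ")" b1'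
    ((PySem.Str.split? (PySem.Str.slice string (some b1') (some e1)) ",").getD []).map
      (fun p => (PySem.Int.ofStr? p).getD 0)
  else []

def listInput (string : String) (bits : Int) : List Int :=
  let ones := pvOnes string
  let dontCares := pvDontCares string
  (PySem.List.pyRange 0 ((2 : Int) ^ bits.toNat)).foldl
    (fun kmap i =>
      if i ∈ ones then kmap ++ [1]
      else if i ∈ dontCares then kmap ++ [2]
      else kmap ++ [0]) []

-- ===== PORT B =====
def listInput_alt (string : String) (bits : Int) : List Int :=
  let ones := pvOnes string
  let dontCares := pvDontCares string
  let n : Nat := 2 ^ bits.toNat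
  let kmap0 : List Int := List.replicate n 0
  let kmap1 := dontCares.foldl
    (fun km d => if 0 ≤ d ∧ d < (n : Int) then km.set d.toNat 2 else km) kmap0
  ones.foldl (fun km o => if 0 ≤ o ∧ o < (n : Int) then km.set o.toNat 1 else km) kmap1

-- ===== PRECONDITION & SPEC =====
-- Pre_ excludes exactly the inputs where the Pythons raise or never return: bits < 0
-- (range(2**bits) is a TypeError), minterm/don't-care fragments on which int() raises
-- ValueError, and bits ≥ 63, where the 2**bits-element result is unbuildable — A never
-- terminates and B's [0]*2**bits raises OverflowError on 64-bit CPython.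
def Pre_listInput (string : String) (bits : Int) : Prop :=
  0 ≤ bits ∧ bits < 63 ∧
  (let inner := PySem.Str.slice string (some (PySem.Str.find string "(" + 1))
                  (some (PySem.Str.find string ")"))
   PySem.Str.find inner "," ≠ -1 →
     ∀ p ∈ (PySem.Str.split? inner ",").getD [], (PySem.Int.ofStr? p).isSome = true) ∧
  (PySem.Str.find string "d (" ≠ -1 →
     ∀ p ∈ (PySem.Str.split?
         (PySem.Str.slice string (some (PySem.Str.find string "d (" + 3))
           (some (PySem.Str.findFrom string ")" (PySem.Str.find string "d (" + 3)))) ",").getD [],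
       (PySem.Int.ofStr? p).isSome = true)
instance (string : String) (bits : Int) : Decidable (Pre_listInput string bits) := by
  unfold Pre_listInput; infer_instance

def pvWitness_listInput : String × Int := ("(1,2) d (3)", 2)

def Spec_listInput (string : String) (bits : Int) (out : List Int) : Prop := out = listInput_alt string bits
instance (string : String) (bits : Int) (out : List Int) : Decidable (Spec_listInput string bits out) := by unfold Spec_listInput; infer_instance

-- ===== CLAIM (what is proved, stated in full; the proofs are below) =====
def Claim_equal_listInput : Prop := ∀ (string : String) (bits : Int), Dom_listInput string bits → Pre_listInput string bits → Spec_listInput string bits (listInput string bits)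

-- ===== LEMMAS AND PROOFS =====

-- a scatter pass preserves the length of the k-map
lemma scatter_length (n : Nat) (v : Int) (L : List Int) (km : List Int) :
    (L.foldl (fun km d => if 0 ≤ d ∧ d < (n : Int) then km.set d.toNat v else km) km).length
      = km.length := by
  induction L generalizing km with
  | nil => rfl
  | cons d L ih =>
      simp only [List.foldl_cons]
      split_ifs <;> simp [ih]

-- element j of the k-map after scattering v over L: v where j occurred in L, unchanged elsewhere
lemma scatter_getElem (n : Nat) (v : Int) (L : List Int) (km : List Int)
    (hlen : km.length = n) (j : Nat) (hj : j < n) :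
    (L.foldl (fun km d => if 0 ≤ d ∧ d < (n : Int) then km.set d.toNat v else km) km)[j]'(by
        rw [scatter_length]; omega)
      = if (j : Int) ∈ L then v else km[j]'(by omega) := by
  induction L generalizing km with
  | nil => simp
  | cons d L ih =>
      simp only [List.foldl_cons]
      rw [ih _ (by split_ifs <;> simp [hlen])]
      by_cases hmem : (j : Int) ∈ L
      · simp [hmem]
      · simp only [hmem, if_false, List.mem_cons]
        by_cases hd : d = (j : Int)
        · subst hd
          have hg : 0 ≤ (j : Int) ∧ (j : Int) < (n : Int) := by
            constructor <;> omega
          simp [hg]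
        · have hdj : ¬((j : Int) = d) := fun h => hd h.symm
          by_cases hg : 0 ≤ d ∧ d < (n : Int)
          · have hne : d.toNat ≠ j := by omega
            simp [hg, hdj, List.getElem_set, hne]
          · simp [hg, hdj]

-- the main identity: A's membership scan over all cells equals B's two scatter passes
lemma scan_eq_scatter (ones dontCares : List Int) (n : Nat) :
    (PySem.List.pyRange 0 ((n : Nat) : Int)).foldl
        (fun kmap i =>
          if i ∈ ones then kmap ++ [1]
          else if i ∈ dontCares then kmap ++ [2]
          else kmap ++ [0]) ([] : List Int)
      = ones.foldl (fun km o => if 0 ≤ o ∧ o < (n : Int) then km.set o.toNat 1 else km)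
          (dontCares.foldl (fun km d => if 0 ≤ d ∧ d < (n : Int) then km.set d.toNat 2 else km)
            (List.replicate n 0)) := by
  have hfun : (fun (kmap : List Int) (i : Int) =>
        if i ∈ ones then kmap ++ [1]
        else if i ∈ dontCares then kmap ++ [2]
        else kmap ++ [0])
      = fun kmap i => kmap ++ [if i ∈ ones then 1 else if i ∈ dontCares then 2 else 0] := by
    funext km i; split_ifs <;> rfl
  rw [hfun, PySem.List.foldl_append_singleton_eq_map, PySem.List.pyRange_zero_natCast,
    List.map_map]
  apply List.ext_getElem
  · simp [scatter_length]
  · intro j hj₁ hj₂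
    have hjn : j < n := by simpa using hj₁
    rw [scatter_getElem n 1 ones _ (by rw [scatter_length]; simp) j hjn,
      scatter_getElem n 2 dontCares _ (by simp) j hjn]
    simp

-- ===== VERDICT (by name: the statement is the Claim_ definition above) =====
theorem listInput_spec : Claim_equal_listInput := by
  intro string bits _ _
  unfold Spec_listInput listInput listInput_alt
  have h2 : ((2 : Int) ^ bits.toNat) = ((2 ^ bits.toNat : Nat) : Int) := by push_cast; ring
  rw [h2]
  exact scan_eq_scatter (pvOnes string) (pvDontCares string) (2 ^ bits.toNat)
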